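-- pv_equiv track=rewrite | github.com/Bracktus/bits-n-bobs | university/CM3109-Combinatorial-Optimisation/main.py | kemeny_naive
-- ===== SOURCE A (Python) =====
-- def kemeny_naive(ranking, tourney):
--     """Naive way of calculating scores"""
--     score = 0
--     for i in range(len(ranking)):
--         for j in range(i + 1, len(ranking)):
--             pair = (ranking[j], ranking[i])
--             if pair in tourney:
--                 score += tourney[pair]
--     return score
-- ===== SOURCE B (Python) =====
-- def kemeny_naive(ranking, tourney):
--     """Sum weights of tournament pairs the ranking orders in reverse, with multiplicity."""
--     pos = {}
--     for i, e in enumerate(ranking):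
--         pos.setdefault(e, []).append(i)
--     score = 0
--     for (x, y), w in tourney.items():
--         if x in pos and y in pos:
--             score += w * sum(1 for j in pos[x] for i in pos[y] if i < j)
--     return score
-- ===== Notes on version B (the rewrite author's own statement) =====
-- stated objective: faster
-- what changed: Instead of enumerating all O(n^2) index pairs of the ranking and looking each reversed pair up in the tournament dict, B builds per-element position lists in one pass over the ranking and then, in one pass over the tournament entries, adds each weight times the number of reversed position pairs of its two endpoints.
import Mathlib
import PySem

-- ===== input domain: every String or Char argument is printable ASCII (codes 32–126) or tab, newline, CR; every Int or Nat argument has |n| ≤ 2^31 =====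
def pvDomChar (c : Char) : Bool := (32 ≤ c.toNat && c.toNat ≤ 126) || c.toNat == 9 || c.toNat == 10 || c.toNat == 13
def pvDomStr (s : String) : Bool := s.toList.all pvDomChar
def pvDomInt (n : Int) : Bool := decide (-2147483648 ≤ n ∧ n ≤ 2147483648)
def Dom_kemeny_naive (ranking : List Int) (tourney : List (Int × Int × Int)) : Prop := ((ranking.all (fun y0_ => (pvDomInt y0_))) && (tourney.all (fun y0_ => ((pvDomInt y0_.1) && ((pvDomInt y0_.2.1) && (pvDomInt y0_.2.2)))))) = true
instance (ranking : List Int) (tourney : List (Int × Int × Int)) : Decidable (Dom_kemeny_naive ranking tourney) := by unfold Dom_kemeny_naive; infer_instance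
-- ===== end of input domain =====

-- B replaces the O(n^2) pair enumeration by one position index of the ranking and a single pass over the tournament entries (equivalence is about the return value; neither version mutates its arguments).
-- ===== PORT A =====
-- B replaces A's O(n^2) pair enumeration by one pass building per-element position lists and one
-- pass over the tournament entries (alternative algorithm; neither version mutates its arguments).
def kemeny_naive (ranking : List Int) (tourney : List (Int × Int × Int)) : Int :=
  let d : PySem.Dict (Int × Int) Int := PySem.Dict.ofList (tourney.map (fun t => ((t.1, t.2.1), t.2.2)))
  (PySem.List.pyRange 0 ranking.length 1).foldl (fun score i =>
    (PySem.List.pyRange (i + 1) ranking.length 1).foldl (fun score j =>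
      let pair := (PySem.List.pyGetD ranking j 0, PySem.List.pyGetD ranking i 0)
      if d.contains pair then score + d.getD pair 0 else score) score) 0

-- ===== PORT B =====
def kemeny_naive_alt (ranking : List Int) (tourney : List (Int × Int × Int)) : Int :=
  let d : PySem.Dict (Int × Int) Int := PySem.Dict.ofList (tourney.map (fun t => ((t.1, t.2.1), t.2.2)))
  let pos : PySem.Dict Int (List Int) :=
    (PySem.List.enumerate ranking).foldl (fun p ie => p.modify ie.2 [] (· ++ [ie.1])) PySem.Dict.empty
  d.items.foldl (fun score e =>
    if pos.contains e.1.1 && pos.contains e.1.2 then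
      score + e.2 * (((pos.getD e.1.1 []).map
        (fun j => (((pos.getD e.1.2 []).countP (fun i => decide (i < j)) : Nat) : Int))).sum)
    else score) 0

-- ===== PRECONDITION & SPEC =====
def Spec_kemeny_naive (ranking : List Int) (tourney : List (Int × Int × Int)) (out : Int) : Prop := out = kemeny_naive_alt ranking tourney
instance (ranking : List Int) (tourney : List (Int × Int × Int)) (out : Int) : Decidable (Spec_kemeny_naive ranking tourney out) := by
  unfold Spec_kemeny_naive; infer_instance

-- ===== CLAIM (what is proved, stated in full; the proofs are below) =====
def Claim_equal_kemeny_naive : Prop := ∀ (ranking : List Int) (tourney : List (Int × Int × Int)), Dom_kemeny_naive ranking tourney → Spec_kemeny_naive ranking tourney (kemeny_naive ranking tourney)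

-- ===== LEMMAS AND PROOFS =====

-- The tournament list read as the dict both Pythons receive.
def pvDict (tourney : List (Int × Int × Int)) : PySem.Dict (Int × Int) Int :=
  PySem.Dict.ofList (tourney.map (fun t => ((t.1, t.2.1), t.2.2)))

-- The weight A adds for a looked-up pair.
def pvWt (d : PySem.Dict (Int × Int) Int) (p : Int × Int) : Int := (d.get? p).getD 0

-- The list of reversed-order pairs A enumerates, Nat-indexed.
def pvPairs (xs : List Int) : List (Int × Int) :=
  (List.range xs.length).flatMap (fun k =>
    (List.range (xs.length - (k + 1))).map (fun m => (xs.getD (k + 1 + m) 0, xs.getD k 0)))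

-- B's dict of position lists.
def pvPos (xs : List Int) : PySem.Dict Int (List Int) :=
  (PySem.List.enumerate xs).foldl (fun p ie => p.modify ie.2 [] (· ++ [ie.1])) PySem.Dict.empty

-- The positions of x in xs counted from start s, as B's dict stores them.
def pvIdxs (x : Int) (xs : List Int) (s : Int) : List Int :=
  ((PySem.List.enumerate xs s).filter (fun ie => ie.2 == x)).map (fun ie => ie.1)

theorem pv_foldl_ite_add {α : Type} (l : List α) (p : α → Bool) (w : α → Int) (a : Int) :
    l.foldl (fun s x => if p x then s + w x else s) a
      = a + (l.map (fun x => if p x then w x else 0)).sum := by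
  induction l generalizing a with
  | nil => simp
  | cons x t ih =>
    simp only [List.foldl_cons, List.map_cons, List.sum_cons, ih]
    split <;> ring

theorem pv_sum_flatMap {α : Type} (l : List α) (g : α → List Int) :
    (l.flatMap g).sum = (l.map (fun x => (g x).sum)).sum := by
  induction l with
  | nil => simp
  | cons x t ih => simp [List.flatMap_cons, ih]

theorem pv_wt_eq (d : PySem.Dict (Int × Int) Int) (p : Int × Int) :
    (if d.contains p then d.getD p 0 else 0) = pvWt d p := by
  unfold pvWt
  rw [PySem.Dict.contains_eq_isSome_get?, PySem.Dict.getD_eq_get?_getD]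
  cases d.get? p <;> simp

theorem pv_A_eq (xs : List Int) (tourney : List (Int × Int × Int)) :
    kemeny_naive xs tourney = ((pvPairs xs).map (pvWt (pvDict tourney))).sum := by
  unfold kemeny_naive
  simp only [pv_foldl_ite_add, PySem.List.foldl_add, zero_add]
  rw [pvPairs.eq_def, List.map_flatMap, pv_sum_flatMap]
  simp only [pv_wt_eq, pvDict]
  rw [PySem.List.pyRange_zero_natCast, List.map_map]
  apply congrArg
  apply List.map_congr_left
  intro k hk
  rw [List.mem_range] at hk
  simp only [Function.comp]
  rw [PySem.List.pyRange_one, List.map_map]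
  have hlen : ((xs.length : Int) - ((k : Int) + 1)).toNat = xs.length - (k + 1) := by omega
  rw [hlen]
  simp only [List.map_map]
  apply congrArg
  apply List.map_congr_left
  intro m hm
  rw [List.mem_range] at hm
  simp only [Function.comp]
  have h1 : ((k : Int) + 1 + (m : Int)) = ((k + 1 + m : Nat) : Int) := by push_cast; ring
  rw [h1, PySem.List.pyGetD_natCast, PySem.List.pyGetD_natCast]

theorem pv_count_map {α : Type} [BEq α] [LawfulBEq α] [DecidableEq α]
    (f : Nat → α) (l : List Nat) (a : α) :
    (l.map f).count a = l.countP (fun b => decide (f b = a)) := by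
  induction l with
  | nil => simp
  | cons x t ih =>
    simp only [List.map_cons, List.count_cons, List.countP_cons, ih]
    by_cases hfa : f x = a <;> simp [hfa, beq_iff_eq]

theorem pv_flatMap_congr {α β : Type} (l : List α) (f g : α → List β)
    (h : ∀ a ∈ l, f a = g a) : l.flatMap f = l.flatMap g := by
  induction l with
  | nil => simp
  | cons x t ih =>
    rw [List.flatMap_cons, List.flatMap_cons, h x List.mem_cons_self,
      ih (fun a ha => h a (List.mem_cons_of_mem _ ha))]

-- the whole list, read off index by index
theorem pv_map_getD_range (xs : List Int) :
    (List.range xs.length).map (fun m => xs.getD m 0) = xs := by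
  induction xs with
  | nil => simp
  | cons a t ih =>
    rw [List.length_cons, List.range_succ_eq_map, List.map_cons, List.map_map]
    refine congrArg₂ List.cons (by simp) ?_
    conv_rhs => rw [← ih]
    apply List.map_congr_left
    intro m _
    simp [Function.comp]

-- peeling the head element off A's pair list
theorem pv_pairs_cons (a : Int) (t : List Int) :
    pvPairs (a :: t) = ((List.range t.length).map (fun m => (t.getD m 0, a))) ++ pvPairs t := by
  unfold pvPairs
  rw [List.length_cons, List.range_succ_eq_map, List.flatMap_cons]
  congr 1
  · rw [show t.length + 1 - (0 + 1) = t.length by omega]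
    apply List.map_congr_left
    intro m _
    rw [show 0 + 1 + m = m + 1 by omega, List.getD_cons_succ, List.getD_cons_zero]
  · rw [List.flatMap_map]
    apply pv_flatMap_congr
    intro k _
    rw [show t.length + 1 - (k + 1 + 1) = t.length - (k + 1) by omega]
    apply List.map_congr_left
    intro m _
    rw [show k + 1 + 1 + m = (k + 1 + m) + 1 by omega, List.getD_cons_succ,
      show (k + 1 : Nat) = k + 1 from rfl, List.getD_cons_succ]

-- count of one key in A's pair list, peeling the head
theorem pv_pairs_count_cons (x y a : Int) (t : List Int) :
    (pvPairs (a :: t)).count (x, y)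
      = (if a = y then t.count x else 0) + (pvPairs t).count (x, y) := by
  rw [pv_pairs_cons, List.count_append]
  congr 1
  rw [pv_count_map]
  by_cases hay : a = y
  · subst hay
    rw [if_pos rfl]
    have hcongr : ∀ m ∈ List.range t.length,
        (decide ((t.getD m 0, a) = ((x, a) : Int × Int)) = true)
          ↔ (decide (t.getD m 0 = x) = true) := by
      intro m _; simp
    rw [List.countP_congr hcongr]
    conv_rhs => rw [← pv_map_getD_range t]
    rw [pv_count_map]
  · rw [if_neg hay, List.countP_eq_zero.mpr]
    intro m _
    simp only [decide_eq_true_eq, Prod.mk.injEq, not_and]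
    intro _ h2
    exact absurd h2 hay

-- position lists, peeling the head
theorem pv_idxs_cons (x a : Int) (t : List Int) (s : Int) :
    pvIdxs x (a :: t) s = (if a = x then [s] else []) ++ pvIdxs x t (s + 1) := by
  unfold pvIdxs
  rw [PySem.List.enumerate_cons, List.filter_cons]
  by_cases hax : a = x
  · simp [hax]
  · simp [hax]

theorem pv_idxs_ge (x : Int) (xs : List Int) (s : Int) :
    ∀ i ∈ pvIdxs x xs s, s ≤ i := by
  induction xs generalizing s with
  | nil => intro i hi; simp [pvIdxs, PySem.List.enumerate_nil] at hi
  | cons a t ih =>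
    intro i hi
    rw [pv_idxs_cons] at hi
    rcases List.mem_append.mp hi with h | h
    · split at h <;> simp_all
    · have := ih (s + 1) i h
      omega

theorem pv_idxs_length (x : Int) (xs : List Int) (s : Int) :
    (pvIdxs x xs s).length = xs.count x := by
  induction xs generalizing s with
  | nil => simp [pvIdxs, PySem.List.enumerate_nil]
  | cons a t ih =>
    rw [pv_idxs_cons, List.length_append, ih (s + 1)]
    by_cases hax : a = x
    · subst hax
      simp [List.count_cons_self]
      omega
    · simp [hax]

-- a constant 1 inside a Nat sum counts the list's length
theorem pv_sum_map_one_add (l : List Int) (c : Int → Nat) :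
    (l.map (fun j => 1 + c j)).sum = l.length + (l.map c).sum := by
  induction l with
  | nil => simp
  | cons a t ih => simp [ih]; omega

-- THE IDENTITY: B's per-entry inversion count is A's multiplicity of that key
theorem pv_count_eq_S (x y : Int) (xs : List Int) : ∀ s : Int,
    ((pvIdxs x xs s).map (fun j => (pvIdxs y xs s).countP (fun i => decide (i < j)))).sum
      = (pvPairs xs).count (x, y) := by
  induction xs with
  | nil => intro s; simp [pvIdxs, PySem.List.enumerate_nil, pvPairs]
  | cons a t ih =>
    intro s
    rw [pv_pairs_count_cons, pv_idxs_cons x a t s, pv_idxs_cons y a t s, List.map_append,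
      List.sum_append]
    have hhead : (((if a = x then [s] else []) : List Int).map
        (fun j => ((if a = y then [s] else []) ++ pvIdxs y t (s + 1)).countP
          (fun i => decide (i < j)))).sum = 0 := by
      by_cases hax : a = x
      · rw [if_pos hax]
        simp only [List.map_cons, List.map_nil, List.sum_cons, List.sum_nil]
        rw [List.countP_eq_zero.mpr]
        · simp
        · intro i hi
          rcases List.mem_append.mp hi with h | h
          · split at h <;> simp_all
          · have := pv_idxs_ge y t (s + 1) i h
            simp
            omega
      · rw [if_neg hax]
        simp
    rw [hhead, Nat.zero_add]
    by_cases hay : a = y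
    · subst hay
      have hif1 : (if a = a then ([s] : List Int) else []) = [s] := if_pos rfl
      have hif2 : (if a = a then t.count x else 0) = t.count x := if_pos rfl
      rw [hif1, hif2]
      have hcongr : ∀ j ∈ pvIdxs x t (s + 1),
          (([s] ++ pvIdxs a t (s + 1)).countP (fun i => decide (i < j)))
            = 1 + (pvIdxs a t (s + 1)).countP (fun i => decide (i < j)) := by
        intro j hj
        have hs : s < j := by have := pv_idxs_ge x t (s + 1) j hj; omega
        rw [List.countP_append]
        simp [hs]
      rw [List.map_congr_left hcongr, pv_sum_map_one_add, pv_idxs_length, ih (s + 1)]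
    · simp only [if_neg hay, List.nil_append]
      rw [ih (s + 1), Nat.zero_add]

-- cast of a Nat-valued sum into B's Int sum
theorem pv_sum_intCast (l : List Int) (c : Int → Nat) :
    (l.map (fun j => ((c j : Nat) : Int))).sum = (((l.map c).sum : Nat) : Int) := by
  induction l with
  | nil => simp
  | cons a t ih => simp [ih]

theorem pv_sum_map_ite_count (P : List (Int × Int)) (k : Int × Int) (a : Int)
    (g : Int × Int → Int) :
    (P.map (fun p => if k = p then a else g p)).sum
      = (P.count k : Int) * (a - g k) + (P.map g).sum := by
  induction P with
  | nil => simp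
  | cons q t ih =>
    simp only [List.map_cons, List.sum_cons, ih]
    by_cases hkq : k = q
    · subst hkq
      rw [if_pos rfl, List.count_cons_self]
      push_cast
      ring
    · rw [if_neg hkq, List.count_cons_of_ne (fun h => hkq h.symm)]
      ring

theorem pv_exchange (items : List ((Int × Int) × Int)) (P : List (Int × Int))
    (hK : (items.map (fun e => e.1)).Nodup) :
    (P.map (fun p => ((PySem.Dict.mk items).get? p).getD 0)).sum
      = (items.map (fun e => (P.count e.1 : Int) * e.2)).sum := by
  induction items with
  | nil => simp [PySem.Dict.get?]
  | cons e t ih =>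
    obtain ⟨k, v⟩ := e
    rcases List.nodup_cons.mp hK with ⟨hk, ht⟩
    have hnone : (PySem.Dict.mk t).get? k = none := by
      rw [PySem.Dict.get?_eq_none_iff_not_mem_keys]
      simpa using hk
    have hpt : ∀ p, ((PySem.Dict.mk ((k, v) :: t)).get? p).getD 0
        = if k = p then v else ((PySem.Dict.mk t).get? p).getD 0 := by
      intro p
      rw [PySem.Dict.get?_mk_cons]
      by_cases hkp : k = p
      · simp [hkp]
      · simp [hkp, beq_eq_false_iff_ne.mpr hkp]
    simp only [List.map_congr_left (fun p _ => hpt p), pv_sum_map_ite_count P k v _, ih ht,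
      List.map_cons, List.sum_cons, hnone]
    simp

-- B's dict knows exactly the ranking's elements …
theorem pv_pos_contains (xs : List Int) (x : Int) :
    (pvPos xs).contains x = decide (x ∈ xs) := by
  rw [PySem.Dict.contains_eq_decide_mem_keys]
  unfold pvPos
  rw [PySem.Dict.keys_foldl_modify_key]
  have h1 : (PySem.Dict.empty : PySem.Dict Int (List Int)).keys = [] := by simp
  rw [h1, PySem.List.map_snd_enumerate, PySem.Set.update_nil_left]
  simp [PySem.Set.mem_ofList]

-- … and stores each element's ascending position list
theorem pv_pos_getD (xs : List Int) (x : Int) :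
    (pvPos xs).getD x [] = pvIdxs x xs 0 := by
  unfold pvPos
  have hswap : (PySem.List.enumerate xs).foldl
        (fun p ie => p.modify ie.2 [] (· ++ [ie.1])) PySem.Dict.empty
      = (((PySem.List.enumerate xs).map (fun ie => (ie.2, ie.1))).foldl
        (fun p q => p.modify q.1 [] (· ++ [q.2])) PySem.Dict.empty) := by
    rw [List.foldl_map]
  rw [hswap, PySem.Dict.getD_foldl_modify_append]
  unfold pvIdxs
  rw [show PySem.List.enumerate xs = PySem.List.enumerate xs 0 from rfl]
  simp only [PySem.Dict.getD_empty, List.nil_append, List.filter_map, List.map_map]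
  congr 1

theorem pv_idxs_empty_of_not_mem (x : Int) (xs : List Int) (s : Int) (h : x ∉ xs) :
    pvIdxs x xs s = [] := by
  unfold pvIdxs
  rw [List.filter_eq_nil_iff.mpr, List.map_nil]
  intro ie hie
  rcases (PySem.List.mem_enumerate_iff _ _ _).mp hie with ⟨k, hk, rfl⟩
  simp only [beq_iff_eq]
  intro he
  exact h (he ▸ List.getElem_mem hk)

-- ===== VERDICT (by name: the statement is the Claim_ definition above) =====
theorem kemeny_naive_spec : Claim_equal_kemeny_naive := by
  intro ranking tourney _
  unfold Spec_kemeny_naive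
  rw [pv_A_eq]
  have hK : ((pvDict tourney).items.map (fun e => e.1)).Nodup := by
    have := PySem.Dict.nodup_keys_ofList (tourney.map (fun t => ((t.1, t.2.1), t.2.2)))
    simpa [PySem.Dict.keys, pvDict] using this
  have hx := pv_exchange (pvDict tourney).items (pvPairs ranking) hK
  have hmk : PySem.Dict.mk (pvDict tourney).items = pvDict tourney := rfl
  rw [hmk] at hx
  rw [show (fun p => ((pvDict tourney).get? p).getD 0) = pvWt (pvDict tourney) from rfl] at hx
  rw [hx]
  unfold kemeny_naive_alt
  simp only [pv_foldl_ite_add, zero_add]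
  apply congrArg
  apply (List.map_congr_left _).symm
  intro e _
  rw [show ((PySem.List.enumerate ranking).foldl
      (fun p ie => p.modify ie.2 [] (· ++ [ie.1])) PySem.Dict.empty) = pvPos ranking from rfl,
    pv_pos_contains, pv_pos_contains, pv_pos_getD, pv_pos_getD, pv_sum_intCast,
    pv_count_eq_S e.1.1 e.1.2 ranking 0]
  by_cases h1 : e.1.1 ∈ ranking
  · by_cases h2 : e.1.2 ∈ ranking
    · rw [show ((e.1.1, e.1.2) : Int × Int) = e.1 from rfl]
      simp [h1, h2, mul_comm]
    · rw [show ((e.1.1, e.1.2) : Int × Int) = e.1 from rfl] at *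
      have : (pvPairs ranking).count e.1 = 0 := by
        rw [← pv_count_eq_S e.1.1 e.1.2 ranking 0,
          pv_idxs_empty_of_not_mem e.1.2 ranking 0 h2]
        simp
      simp [h2, this]
  · rw [show ((e.1.1, e.1.2) : Int × Int) = e.1 from rfl] at *
    have : (pvPairs ranking).count e.1 = 0 := by
      rw [← pv_count_eq_S e.1.1 e.1.2 ranking 0,
        pv_idxs_empty_of_not_mem e.1.1 ranking 0 h1]
      simp
    simp [h1, this]
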